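-- pv_equiv track=rewrite | github.com/SSAFY-while-true/se0hyun | 202504_2/programmers_250136.py | solution
-- ===== SOURCE A (Python) =====
-- from collections import deque
--
-- def solution(land):
--     n, m = len(land), len(land[0])
--     dirs = [(1,0), (-1,0), (0,1), (0,-1)]
--     visited = [[0] * m for _ in range(n)]   # visited 초기화
--     cols_oil = [0] * m
--
--     def bfs(r, c):
--         queue = deque([(r, c)])
--         visited[r][c] = 1
--         cols = set([c])
--         result = 1      # 이미 시작점 +1
--
--         while queue:
--             cx, cy = queue.popleft()
--             for dx, dy in dirs:
--                 nx, ny = cx + dx, cy + dy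
--                 if 0 <= nx < n and 0 <= ny < m and land[nx][ny] == 1 and visited[nx][ny] == 0:
--                     visited[nx][ny] = 1
--                     queue.append((nx, ny))
--                     result += 1
--                     cols.add(ny)
--         for col in cols:
--             cols_oil[col] += result
--
--     for i in range(n):
--         for j in range(m):
--             if land[i][j] == 1 and visited[i][j] == 0:  # 석유가 있음
--                 bfs(i, j)    # bfs에 넣고
--     return max(cols_oil)
-- ===== SOURCE B (Python) =====
-- def solution(land):
--     n, m = len(land), len(land[0])
--
--     # union-find over the oil cells (no path compression; roots found by walking parents)
--     parent = {}
--     for i in range(n):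
--         for j in range(m):
--             if land[i][j] == 1:
--                 parent[(i, j)] = (i, j)
--
--     def find(p):
--         while parent[p] != p:
--             p = parent[p]
--         return p
--
--     for i in range(n):
--         for j in range(m):
--             if (i, j) in parent:
--                 for q in ((i + 1, j), (i, j + 1)):
--                     if q in parent:
--                         ra, rb = find((i, j)), find(q)
--                         if ra != rb:
--                             parent[rb] = ra
--
--     # size of each component, keyed by its root
--     size = {}
--     for p in parent:
--         r = find(p)
--         size[r] = size.get(r, 0) + 1
--
--     # per column: sum the sizes of the distinct components touching it
--     cols_oil = [sum(size[r] for r in {find((i, j)) for i in range(n) if (i, j) in parent})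
--                 for j in range(m)]
--     return max(cols_oil)
-- ===== Notes on version B (the rewrite author's own statement) =====
-- stated objective: alternative
-- what changed: A's per-seed BFS flood fill with in-flight column accounting is replaced by a union-find (disjoint-set) pass that unions each oil cell with its right and down neighbours, then a size tally per root and a per-column sum over the distinct roots occurring in that column.
import Mathlib
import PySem

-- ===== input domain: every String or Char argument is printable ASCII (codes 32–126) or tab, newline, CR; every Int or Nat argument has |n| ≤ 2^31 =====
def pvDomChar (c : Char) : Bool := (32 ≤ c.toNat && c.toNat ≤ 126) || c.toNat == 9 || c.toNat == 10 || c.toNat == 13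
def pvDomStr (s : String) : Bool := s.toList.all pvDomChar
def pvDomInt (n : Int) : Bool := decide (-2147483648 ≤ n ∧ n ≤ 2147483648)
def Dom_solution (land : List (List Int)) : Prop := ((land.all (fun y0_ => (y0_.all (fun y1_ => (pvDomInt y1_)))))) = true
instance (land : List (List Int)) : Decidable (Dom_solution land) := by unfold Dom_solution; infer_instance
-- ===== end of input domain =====

-- B replaces A's per-seed BFS flood fill (deque + in-flight column accounting) by a union-find
-- (disjoint-set) structure: one pass unions each oil cell with its right and down neighbours,
-- then component sizes are tallied per root and each column sums the sizes of the distinct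
-- roots occurring in it.  Alternative algorithm; not claimed faster.

-- ===== shared primitive helpers (both Pythons contain these very tests) =====

-- land[x][y] == 1 (indices in range on every use inside Pre_)
def pvCell1 (land : List (List Int)) (x y : Int) : Bool :=
  PySem.List.pyGetD (PySem.List.pyGetD land x []) y 0 == 1

-- the guard  0 <= x < n and 0 <= y < m and land[x][y] == 1
def pvOil (land : List (List Int)) (n m x y : Int) : Bool :=
  decide (0 ≤ x) && decide (x < n) && decide (0 ≤ y) && decide (y < m) && pvCell1 land x y

-- cols_oil[col] += v
def pvBump (co : List Int) (i v : Int) : List Int :=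
  PySem.List.pySetD co i (PySem.List.pyGetD co i 0 + v)

-- all in-bounds cells; used only by the termination measure of the loops
def pvGrid (n m : Int) : List (Int × Int) :=
  (PySem.List.pyRange 0 n 1).flatMap (fun x => (PySem.List.pyRange 0 m 1).map (fun y => (x, y)))

def pvUnvis (n m : Int) (v : List (Int × Int)) : Nat :=
  ((pvGrid n m).filter (fun p => !(decide (p ∈ v)))).length

lemma pvOil_mem_grid {land : List (List Int)} {n m x y : Int}
    (h : pvOil land n m x y = true) : (x, y) ∈ pvGrid n m := by
  simp only [pvOil, Bool.and_eq_true, decide_eq_true_eq] at h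
  simp only [pvGrid, List.mem_flatMap, List.mem_map]
  exact ⟨x, by rw [PySem.List.mem_pyRange_one]; exact ⟨h.1.1.1.1, h.1.1.1.2⟩,
         y, by rw [PySem.List.mem_pyRange_one]; exact ⟨h.1.1.2, h.1.2⟩, rfl⟩

lemma pvFilterAux {p : Int × Int} {v : List (Int × Int)} (hv : p ∉ v) :
    ∀ l : List (Int × Int), p ∈ l →
      (l.filter (fun q => !(decide (q ∈ p :: v)))).length <
      (l.filter (fun q => !(decide (q ∈ v)))).length := by
  intro l hl
  induction l with
  | nil => simp at hl
  | cons a t ih =>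
    have hmono : (t.filter (fun q => !(decide (q ∈ p :: v)))).length ≤
        (t.filter (fun q => !(decide (q ∈ v)))).length :=
      List.Sublist.length_le (List.monotone_filter_right t (fun q h => by
        simp only [Bool.not_eq_eq_eq_not, Bool.not_true, decide_eq_false_iff_not,
          List.mem_cons, not_or] at h ⊢
        exact h.2))
    rw [List.filter_cons, List.filter_cons]
    rcases List.mem_cons.mp hl with rfl | hpt
    · rw [if_neg (by simp), if_pos (by simp [hv])]
      simpa using Nat.lt_succ_of_le hmono
    · by_cases hb : a ∈ v
      · rw [if_neg (by simp; exact fun _ => hb), if_neg (by simpa using hb)]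
        exact ih hpt
      · by_cases ha : a ∈ p :: v
        · rw [if_neg (by simp [ha]), if_pos (by simp [hb])]
          exact Nat.lt_succ_of_le (Nat.le_of_lt (ih hpt))
        · rw [if_pos (by simp [ha]), if_pos (by simp [hb])]
          simpa using ih hpt

lemma pvUnvis_cons_lt {n m : Int} {p : Int × Int} {v : List (Int × Int)}
    (hg : p ∈ pvGrid n m) (hv : p ∉ v) : pvUnvis n m (p :: v) < pvUnvis n m v :=
  pvFilterAux hv (pvGrid n m) hg

-- ===== PORT A =====

-- dirs = [(1,0), (-1,0), (0,1), (0,-1)]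
def pvDirs : List (Int × Int) := [(1, 0), (-1, 0), (0, 1), (0, -1)]

-- the body of A's  'for dx, dy in dirs'  loop; state = (queue, visited, result, cols)
def pvAStep (land : List (List Int)) (n m cx cy : Int) :
    (List (Int × Int) × List (Int × Int) × Int × PySem.Set Int) → Int × Int →
    (List (Int × Int) × List (Int × Int) × Int × PySem.Set Int)
  | (queue, visited, result, cols), d =>
    let nx := cx + d.1
    let ny := cy + d.2
    if pvOil land n m nx ny && !(decide ((nx, ny) ∈ visited)) then
      (queue ++ [(nx, ny)], (nx, ny) :: visited, result + 1, cols.add ny)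
    else (queue, visited, result, cols)

lemma pvAStep_measure (land : List (List Int)) (n m cx cy : Int) :
    ∀ (ds : List (Int × Int)) (q v : List (Int × Int)) (r : Int) (c : PySem.Set Int),
      ((ds.foldl (pvAStep land n m cx cy) (q, v, r, c)).1).length +
        2 * pvUnvis n m ((ds.foldl (pvAStep land n m cx cy) (q, v, r, c)).2.1) ≤
      q.length + 2 * pvUnvis n m v := by
  intro ds
  induction ds with
  | nil => intro q v r c; simp
  | cons d t ih =>
    intro q v r c
    rw [List.foldl_cons]
    by_cases h : (pvOil land n m (cx + d.1) (cy + d.2) &&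
        !(decide ((cx + d.1, cy + d.2) ∈ v))) = true
    · have hst : pvAStep land n m cx cy (q, v, r, c) d =
          (q ++ [(cx + d.1, cy + d.2)], (cx + d.1, cy + d.2) :: v, r + 1, c.add (cy + d.2)) := by
        simp only [pvAStep]
        rw [if_pos h]
      rw [hst]
      have h1 := ih (q ++ [(cx + d.1, cy + d.2)]) ((cx + d.1, cy + d.2) :: v) (r + 1)
        (c.add (cy + d.2))
      have h2 : pvUnvis n m ((cx + d.1, cy + d.2) :: v) < pvUnvis n m v := by
        rcases (Bool.and_eq_true _ _).mp h with ⟨ho, hnv⟩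
        exact pvUnvis_cons_lt (pvOil_mem_grid ho) (by simpa using hnv)
      simp only [List.length_append, List.length_cons, List.length_nil] at h1 ⊢
      omega
    · have hst : pvAStep land n m cx cy (q, v, r, c) d = (q, v, r, c) := by
        simp only [pvAStep]
        rw [if_neg h]
      rw [hst]
      exact ih q v r c

-- A's 'while queue' loop
def pvBfsLoop (land : List (List Int)) (n m : Int) (queue visited : List (Int × Int))
    (result : Int) (cols : PySem.Set Int) : List (Int × Int) × Int × PySem.Set Int :=
  match queue with
  | [] => (visited, result, cols)
  | (cx, cy) :: rest =>
    let st := pvDirs.foldl (pvAStep land n m cx cy) (rest, visited, result, cols)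
    pvBfsLoop land n m st.1 st.2.1 st.2.2.1 st.2.2.2
termination_by queue.length + 2 * pvUnvis n m visited
decreasing_by
  have h := pvAStep_measure land n m cx cy pvDirs rest visited result cols
  simp only [List.length_cons]
  omega

-- body of A's scan: 'if land[i][j] == 1 and visited[i][j] == 0: bfs(i, j)';
-- bfs marks the start, runs the queue loop, then does 'for col in cols: cols_oil[col] += result'
def pvAOuter (land : List (List Int)) (n m : Int)
    (st : List (Int × Int) × List Int) (p : Int × Int) : List (Int × Int) × List Int :=
  if pvCell1 land p.1 p.2 && !(decide (p ∈ st.1)) then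
    let r := pvBfsLoop land n m [p] (p :: st.1) 1 (PySem.Set.ofList [p.2])
    (r.1, r.2.2.foldl (fun co col => pvBump co col r.2.1) st.2)
  else st

def solution (land : List (List Int)) : Int :=
  let n : Int := land.length
  let m : Int := (PySem.List.pyGetD land 0 []).length
  let st := (PySem.List.pyRange 0 n 1).foldl
    (fun st i => (PySem.List.pyRange 0 m 1).foldl (fun st j => pvAOuter land n m st (i, j)) st)
    ([], List.replicate m.toNat 0)
  (PySem.List.max? st.2 (fun x => x)).getD 0

-- ===== PORT B =====

-- find(p): walk parent pointers until a fixpoint.  The Python 'while' needs no fuel; here the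
-- fuel 'par.size' is a totality guard only — it is proved sufficient on every dict B builds
-- (chains of distinct keys cannot be longer than the dict).  'parent[p]' on a missing key
-- raises KeyError in Python; B only calls find on keys, so the 'none => p' branch is unreachable.
def ufFind (par : PySem.Dict (Int × Int) (Int × Int)) : Nat → (Int × Int) → (Int × Int)
  | 0, p => p
  | Nat.succ f, p =>
    match PySem.Dict.get? par p with
    | none => p
    | some q => if q = p then p else ufFind par f q

-- inner loop body: 'if q in parent: ra, rb = find((i,j)), find(q); if ra != rb: parent[rb] = ra'
def ufUnionNbr (d : PySem.Dict (Int × Int) (Int × Int)) (p q : Int × Int) :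
    PySem.Dict (Int × Int) (Int × Int) :=
  if (PySem.Dict.get? d q).isSome then
    let ra := ufFind d (PySem.Dict.size d) p
    let rb := ufFind d (PySem.Dict.size d) q
    if ra ≠ rb then PySem.Dict.insert d rb ra else d
  else d

-- 'if (i,j) in parent: for q in ((i+1,j), (i,j+1)): …'
def ufUnionCell (d : PySem.Dict (Int × Int) (Int × Int)) (p : Int × Int) :
    PySem.Dict (Int × Int) (Int × Int) :=
  if (PySem.Dict.get? d p).isSome then
    ([(p.1 + 1, p.2), (p.1, p.2 + 1)] : List (Int × Int)).foldl (fun d q => ufUnionNbr d p q) d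
  else d

-- 'parent = {}; for i … for j …: if land[i][j] == 1: parent[(i,j)] = (i,j)'
def ufInit (land : List (List Int)) (n m : Int) : PySem.Dict (Int × Int) (Int × Int) :=
  (PySem.List.pyRange 0 n 1).foldl
    (fun d i => (PySem.List.pyRange 0 m 1).foldl
      (fun d j => if pvCell1 land i j then PySem.Dict.insert d (i, j) (i, j) else d) d)
    PySem.Dict.empty

-- 'size = {}; for p in parent: r = find(p); size[r] = size.get(r, 0) + 1'
def ufSizes (d : PySem.Dict (Int × Int) (Int × Int)) : PySem.Dict (Int × Int) Int :=
  (PySem.Dict.keys d).foldl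
    (fun s p => PySem.Dict.modify s (ufFind d (PySem.Dict.size d) p) 0 (· + 1))
    PySem.Dict.empty

-- 'sum(size[r] for r in {find((i,j)) for i in range(n) if (i,j) in parent})'
-- (a sum over a Python set: order-independent; size[r] is present for every root r)
def ufColSum (d : PySem.Dict (Int × Int) (Int × Int)) (sizes : PySem.Dict (Int × Int) Int)
    (n j : Int) : Int :=
  (PySem.Set.ofList
      (((PySem.List.pyRange 0 n 1).filter (fun i => (PySem.Dict.get? d (i, j)).isSome)).map
        (fun i => ufFind d (PySem.Dict.size d) (i, j)))).foldl
    (fun s r => s + PySem.Dict.getD sizes r 0) 0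

def solution_alt (land : List (List Int)) : Int :=
  let n : Int := land.length
  let m : Int := (PySem.List.pyGetD land 0 []).length
  let par0 := ufInit land n m
  let par := (PySem.List.pyRange 0 n 1).foldl
    (fun d i => (PySem.List.pyRange 0 m 1).foldl (fun d j => ufUnionCell d (i, j)) d) par0
  let sizes := ufSizes par
  let cols := (PySem.List.pyRange 0 m 1).map (fun j => ufColSum par sizes n j)
  (PySem.List.max? cols (fun x => x)).getD 0

-- ===== PRECONDITION & SPEC =====

-- Pre_ excludes exactly the inputs where the Python A raises: empty land (IndexError on land[0]),
-- an empty first row (ValueError: max of the empty cols_oil), and a row shorter than the first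
-- row (IndexError when the scan reads land[i][j]). Rows longer than the first are admitted.
def Pre_solution (land : List (List Int)) : Prop :=
  land ≠ [] ∧ 0 < (land.headD []).length ∧ ∀ row ∈ land, (land.headD []).length ≤ row.length

instance (land : List (List Int)) : Decidable (Pre_solution land) := by
  unfold Pre_solution; infer_instance

def pvWitness_solution : List (List Int) := [[1, 0], [0, 1]]

def Spec_solution (land : List (List Int)) (out : Int) : Prop := out = solution_alt land
instance (land : List (List Int)) (out : Int) : Decidable (Spec_solution land out) := by
  unfold Spec_solution; infer_instance

-- ===== CLAIM (what is proved, stated in full; the proofs are below) =====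
def Claim_equal_solution : Prop :=
  ∀ (land : List (List Int)), Dom_solution land → Pre_solution land →
    Spec_solution land (solution land)

-- ===== LEMMAS AND PROOFS =====

-- oil-cell adjacency: both endpoints pass the guard and they differ by one of dirs
def pvAdj (land : List (List Int)) (n m : Int) (p q : Int × Int) : Prop :=
  pvOil land n m p.1 p.2 = true ∧ pvOil land n m q.1 q.2 = true ∧
    (q.1 - p.1, q.2 - p.2) ∈ pvDirs

def pvReach (land : List (List Int)) (n m : Int) : Int × Int → Int × Int → Prop :=
  Relation.ReflTransGen (pvAdj land n m)

-- the oil cells of the grid, in scan order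
def oilList (land : List (List Int)) (n m : Int) : List (Int × Int) :=
  (pvGrid n m).filter (fun p => pvCell1 land p.1 p.2)

-- "the component of p touches column j"
def pvTouch (land : List (List Int)) (n m : Int) (p : Int × Int) (j : Int) : Prop :=
  ∃ q, pvReach land n m p q ∧ q.2 = j

-- number of cells of V whose component touches column j (the common yardstick of both ports)
noncomputable def touchCnt (land : List (List Int)) (n m : Int)
    (V : List (Int × Int)) (j : Int) : Nat :=
  (V.filter (fun p => @decide (pvTouch land n m p j) (Classical.propDecidable _))).length

lemma mem_pvGrid {n m : Int} {p : Int × Int} :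
    p ∈ pvGrid n m ↔ 0 ≤ p.1 ∧ p.1 < n ∧ 0 ≤ p.2 ∧ p.2 < m := by
  rcases p with ⟨x, y⟩
  simp only [pvGrid, List.mem_flatMap, List.mem_map, PySem.List.mem_pyRange_one,
    Prod.mk.injEq]
  constructor
  · rintro ⟨a, ha, b, hb, he1, he2⟩
    subst he1; subst he2
    exact ⟨ha.1, ha.2, hb.1, hb.2⟩
  · rintro ⟨h1, h2, h3, h4⟩
    exact ⟨x, ⟨h1, h2⟩, y, ⟨h3, h4⟩, rfl, rfl⟩

lemma pvGrid_nodup (n m : Int) : (pvGrid n m).Nodup := by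
  rw [pvGrid, List.nodup_flatMap]
  constructor
  · intro x _
    exact (PySem.List.nodup_pyRange_one 0 m).map (fun a b h => by
      simpa using congrArg Prod.snd h)
  · have hnd := PySem.List.nodup_pyRange_one 0 n
    refine List.Pairwise.imp ?_ hnd
    intro a b hab p hpa hpb
    rcases List.mem_map.mp hpa with ⟨y1, _, rfl⟩
    rcases List.mem_map.mp hpb with ⟨y2, _, he⟩
    exact hab (by simpa using congrArg Prod.fst he.symm)

lemma mem_oilList {land : List (List Int)} {n m : Int} {p : Int × Int} :
    p ∈ oilList land n m ↔ pvOil land n m p.1 p.2 = true := by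
  rw [oilList, List.mem_filter]
  constructor
  · rintro ⟨hg, hc⟩
    obtain ⟨h1, h2, h3, h4⟩ := mem_pvGrid.mp hg
    simp [pvOil, h1, h2, h3, h4, hc]
  · intro h
    have hg := pvOil_mem_grid (x := p.1) (y := p.2) h
    simp only [pvOil, Bool.and_eq_true] at h
    exact ⟨by simpa using hg, h.2⟩

lemma oilList_nodup (land : List (List Int)) (n m : Int) : (oilList land n m).Nodup :=
  (pvGrid_nodup n m).filter _

lemma pvAdj_symm {land : List (List Int)} {n m : Int} {p q : Int × Int}
    (h : pvAdj land n m p q) : pvAdj land n m q p := by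
  obtain ⟨h1, h2, h3⟩ := h
  refine ⟨h2, h1, ?_⟩
  simp only [pvDirs, List.mem_cons, List.not_mem_nil, or_false, Prod.mk.injEq] at h3 ⊢
  omega

lemma pvReach_symm {land : List (List Int)} {n m : Int} {p q : Int × Int}
    (h : pvReach land n m p q) : pvReach land n m q p := by
  induction h with
  | refl => exact Relation.ReflTransGen.refl
  | tail hs hl ih => exact Relation.ReflTransGen.head (pvAdj_symm hl) ih

lemma pvReach_oil {land : List (List Int)} {n m : Int} {p q : Int × Int}
    (hp : pvOil land n m p.1 p.2 = true) (h : pvReach land n m p q) :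
    pvOil land n m q.1 q.2 = true := by
  induction h with
  | refl => exact hp
  | tail _ hl _ => exact hl.2.1

lemma pvTouch_congr {land : List (List Int)} {n m : Int} {p q : Int × Int} {j : Int}
    (h : pvReach land n m p q) : (pvTouch land n m p j ↔ pvTouch land n m q j) := by
  constructor
  · rintro ⟨z, hz, hj⟩
    exact ⟨z, Relation.ReflTransGen.trans (pvReach_symm h) hz, hj⟩
  · rintro ⟨z, hz, hj⟩
    exact ⟨z, Relation.ReflTransGen.trans h hz, hj⟩

lemma touchCnt_perm {land : List (List Int)} {n m : Int} {V W : List (Int × Int)} {j : Int}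
    (h : V.Perm W) : touchCnt land n m V j = touchCnt land n m W j := by
  exact (List.Perm.filter _ h).length_eq

lemma touchCnt_append (land : List (List Int)) (n m : Int) (V W : List (Int × Int)) (j : Int) :
    touchCnt land n m (V ++ W) j = touchCnt land n m V j + touchCnt land n m W j := by
  simp [touchCnt, List.filter_append]

-- ===== A-side: characterization of one BFS run (flood fill) =====

lemma pvAStep_fold (land : List (List Int)) (n m cx cy : Int) :
    ∀ (ds : List (Int × Int)) (q v : List (Int × Int)) (r : Int) (c : PySem.Set Int),
    ∃ (ext : List (Int × Int)) (cf : PySem.Set Int),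
      ds.foldl (pvAStep land n m cx cy) (q, v, r, c) =
        (q ++ ext, ext.reverse ++ v, r + (ext.length : Int), cf) ∧
      ext.Nodup ∧ (∀ p ∈ ext, p ∉ v) ∧
      (∀ x, x ∈ ext ↔ x ∉ v ∧ pvOil land n m x.1 x.2 = true ∧
        ∃ d ∈ ds, x = (cx + d.1, cy + d.2)) ∧
      (c.Nodup → cf.Nodup) ∧
      (∀ y, y ∈ cf ↔ y ∈ c ∨ ∃ p ∈ ext, p.2 = y) := by
  intro ds
  induction ds with
  | nil =>
    intro q v r c
    exact ⟨[], c, by simp, by simp, by simp, by simp, fun h => h, by simp⟩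
  | cons d t ih =>
    intro q v r c
    rw [List.foldl_cons]
    by_cases h : (pvOil land n m (cx + d.1) (cy + d.2) &&
        !(decide ((cx + d.1, cy + d.2) ∈ v))) = true
    · have hst : pvAStep land n m cx cy (q, v, r, c) d =
          (q ++ [(cx + d.1, cy + d.2)], (cx + d.1, cy + d.2) :: v, r + 1, c.add (cy + d.2)) := by
        simp only [pvAStep]; rw [if_pos h]
      rw [hst]
      obtain ⟨ho, hnv'⟩ := (Bool.and_eq_true _ _).mp h
      have hnv : (cx + d.1, cy + d.2) ∉ v := by simpa using hnv'
      obtain ⟨ext', cf, heq, hnd, hdisj, hmem, hcnd, hcmem⟩ :=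
        ih (q ++ [(cx + d.1, cy + d.2)]) ((cx + d.1, cy + d.2) :: v) (r + 1) (c.add (cy + d.2))
      refine ⟨(cx + d.1, cy + d.2) :: ext', cf, ?_, ?_, ?_, ?_, ?_, ?_⟩
      · rw [heq]
        refine Prod.ext ?_ (Prod.ext ?_ (Prod.ext ?_ rfl))
        · simp
        · simp
        · simp only [List.length_cons]; push_cast; ring
      · refine List.nodup_cons.mpr ⟨?_, hnd⟩
        intro hc
        exact (hdisj _ hc) (List.mem_cons_self)
      · intro p hp
        rcases List.mem_cons.mp hp with rfl | hp'
        · exact hnv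
        · exact fun hv => (hdisj _ hp') (List.mem_cons_of_mem _ hv)
      · intro x
        constructor
        · intro hx
          rcases List.mem_cons.mp hx with rfl | hx'
          · exact ⟨hnv, ho, d, List.mem_cons_self, rfl⟩
          · obtain ⟨hxv, hxo, d0, hd0, hxe⟩ := (hmem x).mp hx'
            exact ⟨fun hv => hxv (List.mem_cons_of_mem _ hv), hxo, d0,
              List.mem_cons_of_mem _ hd0, hxe⟩
        · rintro ⟨hxv, hxo, d0, hd0, rfl⟩
          rcases List.mem_cons.mp hd0 with rfl | hd0'
          · exact List.mem_cons_self
          · by_cases hxp : ((cx + d0.1, cy + d0.2) : Int × Int) = (cx + d.1, cy + d.2)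
            · rw [hxp]; exact List.mem_cons_self
            · refine List.mem_cons_of_mem _ ((hmem _).mpr ⟨?_, hxo, d0, hd0', rfl⟩)
              intro hc
              rcases List.mem_cons.mp hc with he | hv
              · exact hxp he
              · exact hxv hv
      · intro hc
        exact hcnd (PySem.Set.nodup_add c _ hc)
      · intro y
        rw [hcmem y]
        constructor
        · rintro (hy | ⟨p, hp, hpy⟩)
          · rcases (PySem.Set.mem_add c _ y).mp hy with hy' | rfl
            · exact Or.inl hy'
            · exact Or.inr ⟨_, List.mem_cons_self, rfl⟩
          · exact Or.inr ⟨p, List.mem_cons_of_mem _ hp, hpy⟩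
        · rintro (hy | ⟨p, hp, hpy⟩)
          · exact Or.inl ((PySem.Set.mem_add c _ y).mpr (Or.inl hy))
          · rcases List.mem_cons.mp hp with rfl | hp'
            · exact Or.inl ((PySem.Set.mem_add c _ y).mpr (Or.inr hpy.symm))
            · exact Or.inr ⟨p, hp', hpy⟩
    · have hst : pvAStep land n m cx cy (q, v, r, c) d = (q, v, r, c) := by
        simp only [pvAStep]; rw [if_neg h]
      rw [hst]
      obtain ⟨ext, cf, heq, hnd, hdisj, hmem, hcnd, hcmem⟩ := ih q v r c
      refine ⟨ext, cf, heq, hnd, hdisj, ?_, hcnd, hcmem⟩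
      intro x
      rw [hmem x]
      constructor
      · rintro ⟨hxv, hxo, d0, hd0, hxe⟩
        exact ⟨hxv, hxo, d0, List.mem_cons_of_mem _ hd0, hxe⟩
      · rintro ⟨hxv, hxo, d0, hd0, rfl⟩
        rcases List.mem_cons.mp hd0 with rfl | hd0'
        · exfalso
          apply h
          rw [Bool.and_eq_true]
          exact ⟨hxo, by simpa using hxv⟩
        · exact ⟨hxv, hxo, d0, hd0', rfl⟩

-- the loop invariant of A's flood fill: visited is a nodup list of oil cells containing
-- the worklist, and every unvisited neighbour of a visited cell has its witness on the worklist
def pvInv (land : List (List Int)) (n m : Int) (v w : List (Int × Int)) : Prop :=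
  v.Nodup ∧ (∀ p ∈ w, p ∈ v) ∧ (∀ p ∈ v, pvOil land n m p.1 p.2 = true) ∧
  (∀ p ∈ v, ∀ q, pvAdj land n m p q → q ∈ v ∨ p ∈ w)

lemma pvReach_escape (land : List (List Int)) (n m : Int) {v w : List (Int × Int)}
    (hcl : ∀ p ∈ v, ∀ q, pvAdj land n m p q → q ∈ v ∨ p ∈ w) {s x : Int × Int}
    (hr : pvReach land n m s x) (hs : s ∈ v) :
    x ∈ v ∨ ∃ t ∈ w, pvReach land n m t x := by
  unfold pvReach at hr
  revert hs
  induction hr using Relation.ReflTransGen.head_induction_on with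
  | refl => exact fun hx => Or.inl hx
  | head hac hcb ih =>
    intro ha
    rcases hcl _ ha _ hac with hcv | haw
    · exact ih hcv
    · exact Or.inr ⟨_, haw, Relation.ReflTransGen.head hac hcb⟩

-- what a finished flood fill of A returns, relative to the state at entry
def pvFloodOutA (land : List (List Int)) (n m : Int) (v q : List (Int × Int)) (r : Int)
    (c : PySem.Set Int) (out : List (Int × Int) × Int × PySem.Set Int) : Prop :=
  (∃ pre, out.1 = pre ++ v) ∧
  out.1.Nodup ∧
  (∀ p ∈ out.1, pvOil land n m p.1 p.2 = true) ∧
  (∀ p ∈ out.1, ∀ z, pvAdj land n m p z → z ∈ out.1) ∧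
  (∀ x, x ∈ out.1 ↔ x ∈ v ∨ ∃ s ∈ q, pvReach land n m s x) ∧
  out.2.1 = r + ((out.1.length : Int) - (v.length : Int)) ∧
  out.2.2.Nodup ∧
  (∀ y, y ∈ out.2.2 ↔ y ∈ c ∨ ∃ p, p ∈ out.1 ∧ p ∉ v ∧ p.2 = y)

lemma pvBfsLoop_spec (land : List (List Int)) (n m : Int) :
    ∀ (μ : Nat) (q v : List (Int × Int)) (r : Int) (c : PySem.Set Int),
      q.length + 2 * pvUnvis n m v ≤ μ →
      pvInv land n m v q → c.Nodup →
      pvFloodOutA land n m v q r c (pvBfsLoop land n m q v r c) := by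
  intro μ
  induction μ using Nat.strong_induction_on with
  | _ μ ih =>
    intro q v r c hμ hinv hc
    obtain ⟨hvnd, hqv, hvoil, hvcl⟩ := hinv
    match q with
    | [] =>
      rw [pvBfsLoop]
      refine ⟨⟨[], rfl⟩, hvnd, hvoil, ?_, ?_, by push_cast; ring, hc, ?_⟩
      · intro p hp z hz
        rcases hvcl p hp z hz with h | h
        · exact h
        · simp at h
      · intro x
        constructor
        · exact fun h => Or.inl h
        · rintro (h | ⟨s, hs, _⟩)
          · exact h
          · simp at hs
      · intro y
        constructor
        · exact fun h => Or.inl h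
        · rintro (h | ⟨p, hp1, hp2, _⟩)
          · exact h
          · exact absurd hp1 hp2
    | (cx, cy) :: rest =>
      rw [pvBfsLoop]
      obtain ⟨ext, cf, heq, hend, hedisj, hemem, hcnd', hcmem'⟩ :=
        pvAStep_fold land n m cx cy pvDirs rest v r c
      have hmeas := pvAStep_measure land n m cx cy pvDirs rest v r c
      rw [heq] at hmeas
      dsimp only at hmeas
      rw [heq]
      simp only []
      set v' : List (Int × Int) := ext.reverse ++ v with hv'
      set q' : List (Int × Int) := rest ++ ext with hq'
      have hcxy_v : (cx, cy) ∈ v := hqv _ List.mem_cons_self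
      have hcxy_oil : pvOil land n m cx cy = true := hvoil _ hcxy_v
      have hsubv : ∀ x ∈ v, x ∈ v' := fun x hx => List.mem_append_right _ hx
      have hsube : ∀ x ∈ ext, x ∈ v' := fun x hx =>
        List.mem_append_left _ (List.mem_reverse.mpr hx)
      have hv'mem : ∀ x, x ∈ v' ↔ x ∈ ext ∨ x ∈ v := by
        intro x
        simp [hv', List.mem_append, List.mem_reverse]
      have hadj_ext : ∀ x ∈ ext, pvAdj land n m (cx, cy) x := by
        intro x hx
        obtain ⟨hxv, hxo, d, hd, hxe⟩ := (hemem x).mp hx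
        refine ⟨hcxy_oil, hxo, ?_⟩
        have : (x.1 - cx, x.2 - cy) = d := by
          rw [hxe]
          exact Prod.ext (by simp) (by simp)
        rw [this]
        exact hd
      have hnbr_v' : ∀ z, pvAdj land n m (cx, cy) z → z ∈ v' := by
        intro z ⟨_, hzo, hzd⟩
        by_cases hzv : z ∈ v
        · exact hsubv _ hzv
        · refine hsube _ ((hemem z).mpr ⟨hzv, hzo, (z.1 - cx, z.2 - cy), hzd, ?_⟩)
          exact Prod.ext (by simp) (by simp)
      have hinv' : pvInv land n m v' q' := by
        refine ⟨?_, ?_, ?_, ?_⟩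
        · rw [hv', List.nodup_append]
          refine ⟨List.nodup_reverse.mpr hend, hvnd, ?_⟩
          intro a ha b hb he
          exact (hedisj a (List.mem_reverse.mp ha)) (he ▸ hb)
        · intro p hp
          rcases List.mem_append.mp hp with h | h
          · exact hsubv _ (hqv _ (List.mem_cons_of_mem _ h))
          · exact hsube _ h
        · intro p hp
          rcases (hv'mem p).mp hp with h | h
          · exact ((hemem p).mp h).2.1
          · exact hvoil _ h
        · intro p hp z hz
          rcases (hv'mem p).mp hp with h | h
          · exact Or.inr (List.mem_append_right _ h)
          · rcases hvcl p h z hz with h2 | h2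
            · exact Or.inl (hsubv _ h2)
            · rcases List.mem_cons.mp h2 with he | hr
              · have : p = (cx, cy) := he
                subst this
                exact Or.inl (hnbr_v' z hz)
              · exact Or.inr (List.mem_append_left _ hr)
      have hμ' : q'.length + 2 * pvUnvis n m v' ≤ μ - 1 := by
        simp only [List.length_cons] at hμ
        omega
      have hout := ih (μ - 1) (by
          simp only [List.length_cons] at hμ
          omega) q' v' (r + (ext.length : Int)) cf hμ' hinv' (hcnd' hc)
      obtain ⟨⟨pre', hpre'⟩, hond, hooil, hocl, homem, hores, hocnd, hocols⟩ := hout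
      have hsubout : ∀ x ∈ v', x ∈ (pvBfsLoop land n m q' v' (r + (ext.length : Int)) cf).1 := by
        intro x hx
        rw [hpre']
        exact List.mem_append_right _ hx
      refine ⟨⟨pre' ++ ext.reverse, by rw [hpre', hv', List.append_assoc]⟩, hond, hooil, hocl,
        ?_, ?_, hocnd, ?_⟩
      · intro x
        rw [homem x]
        constructor
        · rintro (hx | ⟨s, hs, hrs⟩)
          · rcases (hv'mem x).mp hx with h | h
            · exact Or.inr ⟨(cx, cy), List.mem_cons_self,
                Relation.ReflTransGen.single (hadj_ext x h)⟩
            · exact Or.inl h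
          · rcases List.mem_append.mp hs with h | h
            · exact Or.inr ⟨s, List.mem_cons_of_mem _ h, hrs⟩
            · exact Or.inr ⟨(cx, cy), List.mem_cons_self,
                Relation.ReflTransGen.trans
                  (Relation.ReflTransGen.single (hadj_ext s h)) hrs⟩
        · rintro (hx | ⟨s, hs, hrs⟩)
          · exact Or.inl (hsubv _ hx)
          · rcases List.mem_cons.mp hs with he | hr
            · have : s = (cx, cy) := he
              subst this
              rcases pvReach_escape land n m hinv'.2.2.2 hrs (hsubv _ hcxy_v) with h | ⟨t, ht, hrt⟩
              · exact Or.inl h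
              · exact Or.inr ⟨t, ht, hrt⟩
            · exact Or.inr ⟨s, List.mem_append_left _ hr, hrs⟩
      · rw [hores]
        have : v'.length = ext.length + v.length := by
          rw [hv']
          simp
        rw [this]
        push_cast
        ring
      · intro y
        rw [hocols y]
        constructor
        · rintro (hy | ⟨p, hp1, hp2, hp3⟩)
          · rcases (hcmem' y).mp hy with h | ⟨p, hp, hpy⟩
            · exact Or.inl h
            · exact Or.inr ⟨p, hsubout _ (hsube _ hp), hedisj _ hp, hpy⟩
          · exact Or.inr ⟨p, hp1, fun hv0 => hp2 (hsubv _ hv0), hp3⟩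
        · rintro (hy | ⟨p, hp1, hp2, hp3⟩)
          · exact Or.inl ((hcmem' y).mpr (Or.inl hy))
          · by_cases hpv' : p ∈ v'
            · rcases (hv'mem p).mp hpv' with h | h
              · exact Or.inl ((hcmem' y).mpr (Or.inr ⟨p, h, hp3⟩))
              · exact absurd h hp2
            · exact Or.inr ⟨p, hp1, hpv', hp3⟩

-- ===== A-side: the scan invariant and the characterization of A's cols_oil =====

lemma reach_stay {land : List (List Int)} {n m : Int} {V : List (Int × Int)}
    (hcl : ∀ p ∈ V, ∀ z, pvAdj land n m p z → z ∈ V) {p q : Int × Int}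
    (hp : p ∈ V) (h : pvReach land n m p q) : q ∈ V := by
  induction h with
  | refl => exact hp
  | tail _ hl ih => exact hcl _ ih _ hl

lemma length_pvBump (co : List Int) (y v : Int) : (pvBump co y v).length = co.length := by
  rw [pvBump, PySem.List.length_pySetD]

lemma pyGetD_pvBump {co : List Int} {y : Int} (j : Int) (v : Int)
    (hy0 : 0 ≤ y) (hy1 : y < (co.length : Int)) (hj0 : 0 ≤ j) :
    PySem.List.pyGetD (pvBump co y v) j 0 =
      if j = y then PySem.List.pyGetD co j 0 + v else PySem.List.pyGetD co j 0 := by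
  rw [pvBump, PySem.List.pySetD_of_nonneg _ _ hy0,
    PySem.List.pyGetD_of_nonneg _ _ hj0, PySem.List.pyGetD_of_nonneg _ _ hj0,
    PySem.List.pyGetD_of_nonneg _ _ hy0]
  rw [List.getD_eq_getElem?_getD, List.getElem?_set, List.getD_eq_getElem?_getD,
    List.getD_eq_getElem?_getD]
  by_cases hje : j = y
  · subst hje
    rw [if_pos rfl, if_pos (by omega)]
    simp
  · rw [if_neg (by omega), if_neg hje]

lemma foldl_bump_length : ∀ (cols : List Int) (co : List Int) (v : Int),
    (cols.foldl (fun co y => pvBump co y v) co).length = co.length := by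
  intro cols
  induction cols with
  | nil => intro co v; rfl
  | cons y t ih =>
    intro co v
    rw [List.foldl_cons, ih, length_pvBump]

lemma foldl_bump_getD : ∀ (cols : List Int) (co : List Int) (v j : Int),
    (∀ y ∈ cols, 0 ≤ y ∧ y < (co.length : Int)) → 0 ≤ j →
    PySem.List.pyGetD (cols.foldl (fun co y => pvBump co y v) co) j 0 =
      PySem.List.pyGetD co j 0 + v * (cols.count j : Int) := by
  intro cols
  induction cols with
  | nil => intro co v j _ _; simp
  | cons y t ih =>
    intro co v j hin hj0
    obtain ⟨hy0, hy1⟩ := hin y List.mem_cons_self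
    rw [List.foldl_cons, ih _ _ _ (fun z hz => by
        rw [length_pvBump]; exact hin z (List.mem_cons_of_mem _ hz)) hj0,
      pyGetD_pvBump j v hy0 hy1 hj0]
    by_cases hje : j = y
    · subst hje
      rw [if_pos rfl, List.count_cons_self]
      push_cast
      ring
    · rw [if_neg hje, List.count_cons_of_ne (by simpa using fun h => hje h.symm)]

def AInv (land : List (List Int)) (n m : Int) (C : List (Int × Int))
    (st : List (Int × Int) × List Int) : Prop :=
  st.1.Nodup ∧
  (∀ p ∈ st.1, pvOil land n m p.1 p.2 = true) ∧
  (∀ p ∈ st.1, ∀ z, pvAdj land n m p z → z ∈ st.1) ∧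
  (∀ p ∈ C, pvOil land n m p.1 p.2 = true → p ∈ st.1) ∧
  st.2.length = m.toNat ∧
  (∀ j : Int, 0 ≤ j → j < m →
    PySem.List.pyGetD st.2 j 0 = (touchCnt land n m st.1 j : Int))

lemma AOuter_step (land : List (List Int)) (n m : Int) (p : Int × Int)
    (hp : p ∈ pvGrid n m) (C : List (Int × Int)) (st : List (Int × Int) × List Int)
    (h : AInv land n m C st) : AInv land n m (C ++ [p]) (pvAOuter land n m st p) := by
  obtain ⟨hnd, hoil, hcl, hC, hlen, hcols⟩ := h
  by_cases hg : (pvCell1 land p.1 p.2 && !(decide (p ∈ st.1))) = true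
  · obtain ⟨hcell, hnin'⟩ := (Bool.and_eq_true _ _).mp hg
    have hnin : p ∉ st.1 := by simpa using hnin'
    have hOilp : pvOil land n m p.1 p.2 = true := by
      obtain ⟨h1, h2, h3, h4⟩ := mem_pvGrid.mp hp
      simp [pvOil, h1, h2, h3, h4, hcell]
    have hInv : pvInv land n m (p :: st.1) [p] := by
      refine ⟨List.nodup_cons.mpr ⟨hnin, hnd⟩, ?_, ?_, ?_⟩
      · intro q hq
        rcases List.mem_cons.mp hq with rfl | h
        · exact List.mem_cons_self
        · simp at h
      · intro q hq
        rcases List.mem_cons.mp hq with rfl | h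
        · exact hOilp
        · exact hoil _ h
      · intro q hq z hz
        rcases List.mem_cons.mp hq with rfl | h
        · exact Or.inr List.mem_cons_self
        · exact Or.inl (List.mem_cons_of_mem _ (hcl _ h _ hz))
    have hA := pvBfsLoop_spec land n m (1 + 2 * pvUnvis n m (p :: st.1)) [p] (p :: st.1) 1
      (PySem.Set.ofList [p.2]) (by simp) hInv (PySem.Set.nodup_ofList _)
    set outA := pvBfsLoop land n m [p] (p :: st.1) 1 (PySem.Set.ofList [p.2]) with houtA
    obtain ⟨⟨pre, hpre⟩, hond, hooil, hocl, homem, hores, hocnd, hocols⟩ := hA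
    have hIff : ∀ x, x ∈ outA.1 ↔ (x ∈ st.1 ∨ pvReach land n m p x) := by
      intro x
      rw [homem x]
      constructor
      · rintro (hx | ⟨s, hs, hrs⟩)
        · rcases List.mem_cons.mp hx with rfl | h
          · exact Or.inr Relation.ReflTransGen.refl
          · exact Or.inl h
        · have : s = p := by simpa using hs
          subst this
          exact Or.inr hrs
      · rintro (hx | hr)
        · exact Or.inl (List.mem_cons_of_mem _ hx)
        · exact Or.inr ⟨p, List.mem_cons_self, hr⟩
    have hsub : ∀ x ∈ st.1, x ∈ outA.1 := fun x hx => (hIff x).mpr (Or.inl hx)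
    set newlist := outA.1.filter (fun x => !(decide (x ∈ st.1))) with hnew
    have hnewmem : ∀ x, x ∈ newlist ↔ (x ∈ outA.1 ∧ x ∉ st.1) := by
      intro x
      rw [hnew, List.mem_filter]
      simp
    have hvisperm : (outA.1.filter (fun x => decide (x ∈ st.1))).Perm st.1 := by
      refine (List.perm_ext_iff_of_nodup (hond.filter _) hnd).mpr ?_
      intro x
      rw [List.mem_filter]
      simp only [decide_eq_true_eq]
      exact ⟨fun h => h.2, fun h => ⟨hsub x h, h⟩⟩
    have hsplit : outA.1.Perm (st.1 ++ newlist) := by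
      have h1 := List.filter_append_perm (fun x => decide (x ∈ st.1)) outA.1
      have h2 : (outA.1.filter (fun x => decide (x ∈ st.1)) ++ newlist).Perm
          (st.1 ++ newlist) := List.Perm.append_right _ hvisperm
      exact ((h1.symm).trans h2).symm.symm
    have hreach_new : ∀ x ∈ newlist, pvReach land n m p x := by
      intro x hx
      obtain ⟨h1, h2⟩ := (hnewmem x).mp hx
      rcases (hIff x).mp h1 with h | h
      · exact absurd h h2
      · exact h
    have hlenout : outA.1.length = st.1.length + newlist.length := by
      rw [hsplit.length_eq, List.length_append]
    have hval : outA.2.1 = (newlist.length : Int) := by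
      rw [hores, hlenout]
      simp only [List.length_cons]
      push_cast
      ring
    have hcolchar : ∀ y, y ∈ outA.2.2 ↔ pvTouch land n m p y := by
      intro y
      rw [hocols y]
      constructor
      · rintro (hy | ⟨q, hq1, hq2, hq3⟩)
        · have : y = p.2 := by simpa [PySem.Set.mem_ofList] using hy
          subst this
          exact ⟨p, Relation.ReflTransGen.refl, rfl⟩
        · rcases (hIff q).mp hq1 with h | h
          · exact absurd (List.mem_cons_of_mem _ h) hq2
          · exact ⟨q, h, hq3⟩
      · rintro ⟨q, hq, hq2⟩
        by_cases hqp : q = p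
        · subst hqp
          exact Or.inl (by simp [PySem.Set.mem_ofList, hq2])
        · refine Or.inr ⟨q, (hIff q).mpr (Or.inr hq), ?_, hq2⟩
          intro hc
          rcases List.mem_cons.mp hc with he | hv
          · exact hqp he
          · exact hnin (reach_stay hcl hv (pvReach_symm hq))
    have hcolrange : ∀ y ∈ outA.2.2, 0 ≤ y ∧ y < m := by
      intro y hy
      obtain ⟨q, hq, hq2⟩ := (hcolchar y).mp hy
      have := pvReach_oil hOilp hq
      simp only [pvOil, Bool.and_eq_true, decide_eq_true_eq] at this
      subst hq2
      exact ⟨this.1.1.2, this.1.2⟩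
    have hst' : pvAOuter land n m st p =
        (outA.1, outA.2.2.foldl (fun co col => pvBump co col outA.2.1) st.2) := by
      rw [pvAOuter, if_pos hg]
    rw [hst']
    refine ⟨hond, hooil, hocl, ?_, ?_, ?_⟩
    · intro q hq hqoil
      rcases List.mem_append.mp hq with hqC | hqp
      · exact hsub _ (hC q hqC hqoil)
      · have : q = p := by simpa using hqp
        subst this
        exact (hIff q).mpr (Or.inr Relation.ReflTransGen.refl)
    · simp only []
      rw [foldl_bump_length, hlen]
    · intro j hj0 hjm
      simp only []
      have hm0 : 0 < m := lt_of_le_of_lt hj0 hjm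
      rw [foldl_bump_getD outA.2.2 st.2 outA.2.1 j (by
          intro y hy
          obtain ⟨hy0, hy1⟩ := hcolrange y hy
          rw [hlen]
          omega) hj0, hcols j hj0 hjm]
      have hperm := touchCnt_perm (land := land) (n := n) (m := m) (j := j) hsplit
      rw [touchCnt_append] at hperm
      have hcnt : outA.2.2.count j = if j ∈ outA.2.2 then 1 else 0 := by
        by_cases hj : j ∈ outA.2.2
        · rw [if_pos hj, List.count_eq_one_of_mem hocnd hj]
        · rw [if_neg hj, List.count_eq_zero.mpr hj]
      rw [hperm, hcnt]
      by_cases ht : pvTouch land n m p j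
      · have hnewcnt : touchCnt land n m newlist j = newlist.length := by
          rw [touchCnt, List.filter_eq_self.mpr (by
            intro x hx
            simp only [decide_eq_true_eq]
            exact (pvTouch_congr (hreach_new x hx)).mp ht)]
        rw [hnewcnt, if_pos ((hcolchar j).mpr ht), hval]
        push_cast
        ring
      · have hnewcnt : touchCnt land n m newlist j = 0 := by
          rw [touchCnt, List.filter_eq_nil_iff.mpr (by
            intro x hx hdec
            exact ht ((pvTouch_congr (hreach_new x hx)).mpr
              (@of_decide_eq_true _ (Classical.propDecidable _) hdec)))]
          rfl
        rw [hnewcnt, if_neg (fun hc => ht ((hcolchar j).mp hc))]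
        push_cast
        ring
  · have hst' : pvAOuter land n m st p = st := by
      rw [pvAOuter, if_neg hg]
    rw [hst']
    refine ⟨hnd, hoil, hcl, ?_, hlen, hcols⟩
    intro q hq hqoil
    rcases List.mem_append.mp hq with hqC | hqp
    · exact hC q hqC hqoil
    · have : q = p := by simpa using hqp
      subst this
      have hcell : pvCell1 land q.1 q.2 = true := by
        simp only [pvOil, Bool.and_eq_true] at hqoil
        exact hqoil.2
      by_contra hqv
      exact hg (by
        rw [Bool.and_eq_true]
        exact ⟨hcell, by simpa using hqv⟩)

lemma A_scan (land : List (List Int)) (n m : Int) :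
    ∀ (cells : List (Int × Int)) (C : List (Int × Int)) (st : List (Int × Int) × List Int),
      (∀ p ∈ cells, p ∈ pvGrid n m) → AInv land n m C st →
      AInv land n m (C ++ cells) (cells.foldl (pvAOuter land n m) st) := by
  intro cells
  induction cells with
  | nil => intro C st _ h; simpa using h
  | cons c t ih =>
    intro C st hg h
    rw [List.foldl_cons]
    have h1 := AOuter_step land n m c (hg c List.mem_cons_self) C st h
    have h2 := ih (C ++ [c]) (pvAOuter land n m st c)
      (fun p hp => hg p (List.mem_cons_of_mem _ hp)) h1
    simpa [List.append_assoc] using h2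

lemma pvScan_eq {α : Type} (n m : Int) (F : α → Int × Int → α) (init : α) :
    (PySem.List.pyRange 0 n 1).foldl
      (fun st i => (PySem.List.pyRange 0 m 1).foldl (fun st j => F st (i, j)) st) init =
    (pvGrid n m).foldl F init := by
  rw [pvGrid, List.foldl_flatMap]
  congr 1
  funext st i
  rw [List.foldl_map]

-- ===== B-side: union-find =====

-- a parent-pointer step (towards the root)
def ufStep (d : PySem.Dict (Int × Int) (Int × Int)) (a b : Int × Int) : Prop :=
  PySem.Dict.get? d a = some b ∧ b ≠ a

def ufClosed (d : PySem.Dict (Int × Int) (Int × Int)) : Prop :=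
  ∀ p q, PySem.Dict.get? d p = some q → q ∈ PySem.Dict.keys d

def ufAcyc (d : PySem.Dict (Int × Int) (Int × Int)) : Prop :=
  ∃ h : (Int × Int) → Nat, ∀ p q, PySem.Dict.get? d p = some q → q ≠ p → h q < h p

def ufRoot (d : PySem.Dict (Int × Int) (Int × Int)) (p : Int × Int) : Int × Int :=
  ufFind d (PySem.Dict.size d) p

lemma isSome_get?_of_mem_keys {d : PySem.Dict (Int × Int) (Int × Int)} {q : Int × Int}
    (h : q ∈ PySem.Dict.keys d) : (PySem.Dict.get? d q).isSome = true := by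
  rcases he : PySem.Dict.get? d q with _ | w
  · exact absurd ((PySem.Dict.get?_eq_none_iff_not_mem_keys d q).mp he) (by simpa using h)
  · rfl

lemma mem_keys_of_get?_some {d : PySem.Dict (Int × Int) (Int × Int)} {p q : Int × Int}
    (h : PySem.Dict.get? d p = some q) : p ∈ PySem.Dict.keys d := by
  by_contra hc
  rw [(PySem.Dict.get?_eq_none_iff_not_mem_keys d p).mpr hc] at h
  simp at h

lemma keys_length (d : PySem.Dict (Int × Int) (Int × Int)) :
    (PySem.Dict.keys d).length = PySem.Dict.size d := by
  simp [PySem.Dict.keys, PySem.Dict.size]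

lemma ufFind_succ (d : PySem.Dict (Int × Int) (Int × Int)) (f : Nat) (p q : Int × Int)
    (hq : PySem.Dict.get? d p = some q) (hne : q ≠ p) :
    ufFind d (f + 1) p = ufFind d f q := by
  simp only [ufFind, hq]
  rw [if_neg hne]

lemma ufFind_succ_self (d : PySem.Dict (Int × Int) (Int × Int)) (f : Nat) (p : Int × Int)
    (hq : PySem.Dict.get? d p = some p) : ufFind d (f + 1) p = p := by
  simp only [ufFind, hq]
  simp

-- the master lemma about the fueled find: with enough fuel it reaches a parent fixpoint
lemma ufFind_master (d : PySem.Dict (Int × Int) (Int × Int)) (h : (Int × Int) → Nat)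
    (hcl : ufClosed d)
    (hac : ∀ p q, PySem.Dict.get? d p = some q → q ≠ p → h q < h p) :
    ∀ p, p ∈ PySem.Dict.keys d →
      (∀ f g, ((PySem.Dict.keys d).toFinset.filter (fun q => h q < h p)).card + 1 ≤ f →
        ((PySem.Dict.keys d).toFinset.filter (fun q => h q < h p)).card + 1 ≤ g →
        ufFind d f p = ufFind d g p) ∧
      (∀ f, ((PySem.Dict.keys d).toFinset.filter (fun q => h q < h p)).card + 1 ≤ f →
        PySem.Dict.get? d (ufFind d f p) = some (ufFind d f p) ∧
        Relation.ReflTransGen (ufStep d) p (ufFind d f p)) := by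
  suffices H : ∀ k p, ((PySem.Dict.keys d).toFinset.filter (fun q => h q < h p)).card ≤ k →
      p ∈ PySem.Dict.keys d →
      (∀ f g, ((PySem.Dict.keys d).toFinset.filter (fun q => h q < h p)).card + 1 ≤ f →
        ((PySem.Dict.keys d).toFinset.filter (fun q => h q < h p)).card + 1 ≤ g →
        ufFind d f p = ufFind d g p) ∧
      (∀ f, ((PySem.Dict.keys d).toFinset.filter (fun q => h q < h p)).card + 1 ≤ f →
        PySem.Dict.get? d (ufFind d f p) = some (ufFind d f p) ∧
        Relation.ReflTransGen (ufStep d) p (ufFind d f p)) by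
    exact fun p hp => H _ p le_rfl hp
  intro k
  induction k using Nat.strong_induction_on with
  | _ k ih =>
    intro p hk hp
    obtain ⟨q, hq⟩ : ∃ q, PySem.Dict.get? d p = some q := by
      rcases he : PySem.Dict.get? d p with _ | q
      · exact absurd ((PySem.Dict.get?_eq_none_iff_not_mem_keys d p).mp he) (by simpa using hp)
      · exact ⟨q, rfl⟩
    by_cases hqp : q = p
    · subst hqp
      have hval : ∀ f, 1 ≤ f → ufFind d f q = q := by
        intro f hf
        obtain ⟨f', rfl⟩ : ∃ f', f = f' + 1 := ⟨f - 1, by omega⟩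
        exact ufFind_succ_self d f' q hq
      refine ⟨fun f g hf hg => by rw [hval f (by omega), hval g (by omega)], fun f hf => ?_⟩
      rw [hval f (by omega)]
      exact ⟨hq, Relation.ReflTransGen.refl⟩
    · have hhq : h q < h p := hac p q hq hqp
      have hqK : q ∈ PySem.Dict.keys d := hcl p q hq
      have hcard : ((PySem.Dict.keys d).toFinset.filter (fun x => h x < h q)).card <
          ((PySem.Dict.keys d).toFinset.filter (fun x => h x < h p)).card := by
        apply Finset.card_lt_card
        constructor
        · intro x hx
          rw [Finset.mem_filter] at hx ⊢
          exact ⟨hx.1, lt_trans hx.2 hhq⟩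
        · intro hsub
          have hqin : q ∈ (PySem.Dict.keys d).toFinset.filter (fun x => h x < h p) :=
            Finset.mem_filter.mpr ⟨List.mem_toFinset.mpr hqK, hhq⟩
          have := Finset.mem_filter.mp (hsub hqin)
          omega
      obtain ⟨ihstab, ihprops⟩ := ih _ (by omega) q le_rfl hqK
      have hstep : ∀ f, ((PySem.Dict.keys d).toFinset.filter (fun x => h x < h p)).card + 1 ≤ f →
          ufFind d f p = ufFind d (((PySem.Dict.keys d).toFinset.filter
            (fun x => h x < h q)).card + 1) q := by
        intro f hf
        obtain ⟨f', rfl⟩ : ∃ f', f = f' + 1 := ⟨f - 1, by omega⟩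
        rw [ufFind_succ d f' p q hq hqp]
        exact ihstab f' _ (by omega) le_rfl
      refine ⟨fun f g hf hg => by rw [hstep f hf, hstep g hg], fun f hf => ?_⟩
      rw [hstep f hf]
      obtain ⟨hfix, hch⟩ := ihprops _ le_rfl
      exact ⟨hfix, Relation.ReflTransGen.head ⟨hq, hqp⟩ hch⟩

lemma uf_size_adequate (d : PySem.Dict (Int × Int) (Int × Int)) (h : (Int × Int) → Nat)
    {p : Int × Int} (hp : p ∈ PySem.Dict.keys d) :
    ((PySem.Dict.keys d).toFinset.filter (fun q => h q < h p)).card + 1 ≤ PySem.Dict.size d := by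
  have h1 : ((PySem.Dict.keys d).toFinset.filter (fun q => h q < h p)).card <
      (PySem.Dict.keys d).toFinset.card := by
    apply Finset.card_lt_card
    constructor
    · exact Finset.filter_subset _ _
    · intro hsub
      have := Finset.mem_filter.mp (hsub (List.mem_toFinset.mpr hp))
      omega
  have h2 := (PySem.Dict.keys d).toFinset_card_le
  rw [keys_length] at h2
  omega

lemma ufRoot_fix (d : PySem.Dict (Int × Int) (Int × Int)) (hcl : ufClosed d) (hac : ufAcyc d)
    {p : Int × Int} (hp : p ∈ PySem.Dict.keys d) :
    PySem.Dict.get? d (ufRoot d p) = some (ufRoot d p) ∧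
    Relation.ReflTransGen (ufStep d) p (ufRoot d p) := by
  obtain ⟨h, hh⟩ := hac
  exact ((ufFind_master d h hcl hh p hp).2 _ (uf_size_adequate d h hp))

lemma ufRoot_of_fix (d : PySem.Dict (Int × Int) (Int × Int))
    {p : Int × Int} (hp : PySem.Dict.get? d p = some p) (hsz : 1 ≤ PySem.Dict.size d) :
    ufRoot d p = p := by
  rw [ufRoot]
  obtain ⟨f', hf⟩ : ∃ f', PySem.Dict.size d = f' + 1 := ⟨PySem.Dict.size d - 1, by omega⟩
  rw [hf]
  exact ufFind_succ_self d f' p hp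

lemma ufRoot_step (d : PySem.Dict (Int × Int) (Int × Int)) (hcl : ufClosed d) (hac : ufAcyc d)
    {p q : Int × Int} (hs : ufStep d p q) : ufRoot d p = ufRoot d q := by
  obtain ⟨hq, hqp⟩ := hs
  obtain ⟨h, hh⟩ := hac
  have hpK : p ∈ PySem.Dict.keys d := mem_keys_of_get?_some hq
  have hqK : q ∈ PySem.Dict.keys d := hcl p q hq
  have hap := uf_size_adequate d h hpK
  have haq := uf_size_adequate d h hqK
  have hhq : h q < h p := hh p q hq hqp
  have hcard : ((PySem.Dict.keys d).toFinset.filter (fun x => h x < h q)).card <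
      ((PySem.Dict.keys d).toFinset.filter (fun x => h x < h p)).card := by
    apply Finset.card_lt_card
    constructor
    · intro x hx
      rw [Finset.mem_filter] at hx ⊢
      exact ⟨hx.1, lt_trans hx.2 hhq⟩
    · intro hsub
      have hqin : q ∈ (PySem.Dict.keys d).toFinset.filter (fun x => h x < h p) :=
        Finset.mem_filter.mpr ⟨List.mem_toFinset.mpr hqK, hhq⟩
      have := Finset.mem_filter.mp (hsub hqin)
      omega
  obtain ⟨s', hs'⟩ : ∃ s', PySem.Dict.size d = s' + 1 := ⟨PySem.Dict.size d - 1, by omega⟩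
  rw [ufRoot, ufRoot, hs', ufFind_succ d s' p q hq hqp]
  exact (ufFind_master d h hcl hh q hqK).1 s' (s' + 1) (by omega) (by omega)

lemma ufRoot_chain (d : PySem.Dict (Int × Int) (Int × Int)) (hcl : ufClosed d) (hac : ufAcyc d)
    {p r : Int × Int} (hch : Relation.ReflTransGen (ufStep d) p r) : ufRoot d p = ufRoot d r := by
  induction hch with
  | refl => rfl
  | tail _ hl ih => rw [ih, ufRoot_step d hcl hac hl]

lemma reach_of_chain {land : List (List Int)} {n m : Int}
    {d : PySem.Dict (Int × Int) (Int × Int)}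
    (hre : ∀ p q, PySem.Dict.get? d p = some q → pvReach land n m p q)
    {x y : Int × Int} (h : Relation.ReflTransGen (ufStep d) x y) : pvReach land n m x y := by
  induction h with
  | refl => exact Relation.ReflTransGen.refl
  | tail _ hl ih => exact Relation.ReflTransGen.trans ih (hre _ _ hl.1)

-- the whole union-phase invariant
def UFI (land : List (List Int)) (n m : Int) (C : List (Int × Int))
    (d : PySem.Dict (Int × Int) (Int × Int)) : Prop :=
  PySem.Dict.keys d = oilList land n m ∧
  ufClosed d ∧
  ufAcyc d ∧
  (∀ p q, PySem.Dict.get? d p = some q → pvReach land n m p q) ∧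
  (∀ p ∈ C, ∀ q ∈ ([(p.1 + 1, p.2), (p.1, p.2 + 1)] : List (Int × Int)),
    p ∈ PySem.Dict.keys d → q ∈ PySem.Dict.keys d → ufRoot d p = ufRoot d q)

-- effect of one union (parent[rb] = ra) on roots, and preservation of the structure
lemma uf_insert_spec (land : List (List Int)) (n m : Int)
    (d : PySem.Dict (Int × Int) (Int × Int))
    (hK : PySem.Dict.keys d = oilList land n m) (hcl : ufClosed d) (hac : ufAcyc d)
    (hre : ∀ p q, PySem.Dict.get? d p = some q → pvReach land n m p q)
    {ra rb : Int × Int} (hra : PySem.Dict.get? d ra = some ra)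
    (hrb : PySem.Dict.get? d rb = some rb) (hne : ra ≠ rb)
    (hreach : pvReach land n m rb ra) :
    let d' := PySem.Dict.insert d rb ra
    PySem.Dict.keys d' = oilList land n m ∧ ufClosed d' ∧ ufAcyc d' ∧
    (∀ p q, PySem.Dict.get? d' p = some q → pvReach land n m p q) ∧
    (∀ p, p ∈ PySem.Dict.keys d →
      ufRoot d' p = if ufRoot d p = rb then ra else ufRoot d p) := by
  intro d'
  have hrbK : rb ∈ PySem.Dict.keys d := mem_keys_of_get?_some hrb
  have hraK : ra ∈ PySem.Dict.keys d := mem_keys_of_get?_some hra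
  have hcont : PySem.Dict.contains d rb = true := by
    rw [PySem.Dict.contains_eq_isSome_get?, hrb]
    rfl
  have hkeys : PySem.Dict.keys d' = PySem.Dict.keys d :=
    PySem.Dict.keys_insert_of_contains d ra hcont
  have hget : ∀ x, PySem.Dict.get? d' x = if x = rb then some ra else PySem.Dict.get? d x := by
    intro x
    rw [show d' = PySem.Dict.insert d rb ra from rfl, PySem.Dict.get?_insert]
  have hsz1 : 1 ≤ PySem.Dict.size d := by
    rw [← keys_length]
    exact List.length_pos_of_mem hrbK
  have hsz1' : 1 ≤ PySem.Dict.size d' := by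
    rw [← keys_length, hkeys]
    exact List.length_pos_of_mem hrbK
  have hroot_ra : ufRoot d ra = ra := ufRoot_of_fix d hra hsz1
  have hroot_rb : ufRoot d rb = rb := ufRoot_of_fix d hrb hsz1
  obtain ⟨h, hh⟩ := hac
  have hcl' : ufClosed d' := by
    intro p q hpq
    rw [hget p] at hpq
    rw [hkeys]
    by_cases hp : p = rb
    · rw [if_pos hp] at hpq
      cases hpq
      exact hraK
    · rw [if_neg hp] at hpq
      exact hcl p q hpq
  have hac' : ufAcyc d' := by
    refine ⟨fun p => h p + (if ufRoot d p = rb then h ra + 1 else 0), ?_⟩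
    intro p q hpq hqp
    rw [hget p] at hpq
    by_cases hp : p = rb
    · rw [if_pos hp] at hpq
      cases hpq
      subst hp
      simp only []
      rw [hroot_ra, hroot_rb, if_pos rfl, if_neg hne]
      omega
    · rw [if_neg hp] at hpq
      have h1 : h q < h p := hh p q hpq hqp
      have h2 : ufRoot d p = ufRoot d q := ufRoot_step d hcl ⟨h, hh⟩ ⟨hpq, hqp⟩
      simp only []
      rw [h2]
      omega
  have hre' : ∀ p q, PySem.Dict.get? d' p = some q → pvReach land n m p q := by
    intro p q hpq
    rw [hget p] at hpq
    by_cases hp : p = rb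
    · rw [if_pos hp] at hpq
      cases hpq
      subst hp
      exact hreach
    · rw [if_neg hp] at hpq
      exact hre p q hpq
  refine ⟨by rw [hkeys, hK], hcl', hac', hre', ?_⟩
  intro p hp
  have hchain : Relation.ReflTransGen (ufStep d) p (ufRoot d p) :=
    (ufRoot_fix d hcl ⟨h, hh⟩ hp).2
  have hlift : ∀ a b, ufStep d a b → ufStep d' a b := by
    intro a b ⟨hab, hba⟩
    have harb : a ≠ rb := by
      intro he
      subst he
      rw [hrb] at hab
      cases hab
      exact hba rfl
    rw [ufStep, hget a, if_neg harb]
    exact ⟨hab, hba⟩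
  have hchain' : Relation.ReflTransGen (ufStep d') p (ufRoot d p) :=
    Relation.ReflTransGen.mono hlift hchain
  have hstep1 : ufRoot d' p = ufRoot d' (ufRoot d p) := ufRoot_chain d' hcl' hac' hchain'
  by_cases hcase : ufRoot d p = rb
  · rw [if_pos hcase, hstep1, hcase]
    have hsrb : ufStep d' rb ra := by
      rw [ufStep, hget rb, if_pos rfl]
      exact ⟨rfl, hne⟩
    rw [ufRoot_step d' hcl' hac' hsrb]
    exact ufRoot_of_fix d' (by rw [hget ra, if_neg hne]; exact hra) hsz1'
  · rw [if_neg hcase, hstep1]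
    exact ufRoot_of_fix d' (by
      rw [hget (ufRoot d p), if_neg hcase]
      exact (ufRoot_fix d hcl ⟨h, hh⟩ hp).1) hsz1'

lemma unionNbr_pres (land : List (List Int)) (n m : Int) (C : List (Int × Int))
    (d : PySem.Dict (Int × Int) (Int × Int)) (p q : Int × Int)
    (hU : UFI land n m C d) (hpK : p ∈ PySem.Dict.keys d)
    (hadj : q ∈ PySem.Dict.keys d → pvAdj land n m p q) :
    UFI land n m C (ufUnionNbr d p q) ∧
    (q ∈ PySem.Dict.keys d →
      ufRoot (ufUnionNbr d p q) p = ufRoot (ufUnionNbr d p q) q) ∧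
    (∀ a b, a ∈ PySem.Dict.keys d → b ∈ PySem.Dict.keys d →
      ufRoot d a = ufRoot d b → ufRoot (ufUnionNbr d p q) a = ufRoot (ufUnionNbr d p q) b) ∧
    PySem.Dict.keys (ufUnionNbr d p q) = PySem.Dict.keys d := by
  obtain ⟨hK, hcl, hac, hre, hI2⟩ := hU
  by_cases hqs : (PySem.Dict.get? d q).isSome = true
  · obtain ⟨w, hw⟩ := Option.isSome_iff_exists.mp hqs
    have hqK : q ∈ PySem.Dict.keys d := mem_keys_of_get?_some hw
    have hAdj : pvAdj land n m p q := hadj hqK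
    have hra_fix := ufRoot_fix d hcl hac hpK
    have hrb_fix := ufRoot_fix d hcl hac hqK
    by_cases hne : ufFind d (PySem.Dict.size d) p ≠ ufFind d (PySem.Dict.size d) q
    · have hne' : ufRoot d p ≠ ufRoot d q := hne
      have hreach_rb_ra : pvReach land n m (ufRoot d q) (ufRoot d p) := by
        have h1 : pvReach land n m q (ufRoot d q) := reach_of_chain hre hrb_fix.2
        have h2 : pvReach land n m p (ufRoot d p) := reach_of_chain hre hra_fix.2
        exact Relation.ReflTransGen.trans (pvReach_symm h1)
          (Relation.ReflTransGen.trans (pvReach_symm (Relation.ReflTransGen.single hAdj)) h2)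
      have hins := uf_insert_spec land n m d hK hcl hac hre hra_fix.1 hrb_fix.1
        (fun he => hne' he) hreach_rb_ra
      obtain ⟨hK', hcl', hac', hre', hform⟩ := hins
      have hd' : ufUnionNbr d p q = PySem.Dict.insert d (ufRoot d q) (ufRoot d p) := by
        rw [ufUnionNbr, if_pos hqs]
        simp only []
        rw [if_pos hne]
        rfl
      rw [hd']
      have hkeq : PySem.Dict.keys (PySem.Dict.insert d (ufRoot d q) (ufRoot d p)) =
          PySem.Dict.keys d := by rw [hK', hK]
      refine ⟨⟨by rw [hK'], hcl', hac', hre', ?_⟩, ?_, ?_, hkeq⟩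
      · intro a ha b hb haK hbK
        rw [hkeq] at haK hbK
        have hold := hI2 a ha b hb haK hbK
        rw [hform a haK, hform b hbK, hold]
      · intro _
        rw [hform p hpK, hform q hqK, if_neg hne', if_pos rfl]
      · intro a b haK hbK heq
        rw [hform a haK, hform b hbK, heq]
    · have heq : ufRoot d p = ufRoot d q := not_ne_iff.mp hne
      have hd' : ufUnionNbr d p q = d := by
        rw [ufUnionNbr, if_pos hqs]
        simp only []
        rw [if_neg hne]
      rw [hd']
      exact ⟨⟨hK, hcl, hac, hre, hI2⟩, fun _ => heq, fun a b _ _ h => h, rfl⟩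
  · have hd' : ufUnionNbr d p q = d := by
      rw [ufUnionNbr, if_neg (by simpa using hqs)]
    rw [hd']
    refine ⟨⟨hK, hcl, hac, hre, hI2⟩, ?_, fun a b _ _ h => h, rfl⟩
    intro hqK
    exact absurd (isSome_get?_of_mem_keys hqK) hqs

lemma unionCell_pres (land : List (List Int)) (n m : Int) (C : List (Int × Int))
    (d : PySem.Dict (Int × Int) (Int × Int)) (p : Int × Int)
    (hU : UFI land n m C d) : UFI land n m (C ++ [p]) (ufUnionCell d p) := by
  by_cases hps : (PySem.Dict.get? d p).isSome = true
  · obtain ⟨w, hw⟩ := Option.isSome_iff_exists.mp hps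
    have hpK : p ∈ PySem.Dict.keys d := mem_keys_of_get?_some hw
    have hadj : ∀ q : Int × Int, q ∈ ([(p.1 + 1, p.2), (p.1, p.2 + 1)] : List (Int × Int)) →
        q ∈ PySem.Dict.keys d → pvAdj land n m p q := by
      intro q hq hqK
      have hpo : pvOil land n m p.1 p.2 = true := mem_oilList.mp (hU.1 ▸ hpK)
      have hqo : pvOil land n m q.1 q.2 = true := mem_oilList.mp (hU.1 ▸ hqK)
      refine ⟨hpo, hqo, ?_⟩
      rcases List.mem_cons.mp hq with rfl | hq'
      · simp [pvDirs]
      · rcases List.mem_cons.mp hq' with rfl | h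
        · simp [pvDirs]
        · simp at h
    have hcell : ufUnionCell d p =
        ufUnionNbr (ufUnionNbr d p (p.1 + 1, p.2)) p (p.1, p.2 + 1) := by
      rw [ufUnionCell, if_pos hps]
      rfl
    rw [hcell]
    obtain ⟨hU1, hE1, hM1, hk1⟩ := unionNbr_pres land n m C d p (p.1 + 1, p.2) hU hpK
      (hadj _ List.mem_cons_self)
    set d1 := ufUnionNbr d p (p.1 + 1, p.2) with hd1
    obtain ⟨hU2, hE2, hM2, hk2⟩ := unionNbr_pres land n m C d1 p (p.1, p.2 + 1) hU1
      (by rw [hk1]; exact hpK)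
      (by rw [hk1]; exact hadj _ (List.mem_cons_of_mem _ List.mem_cons_self))
    set d2 := ufUnionNbr d1 p (p.1, p.2 + 1) with hd2
    obtain ⟨hK2, hcl2, hac2, hre2, hI22⟩ := hU2
    refine ⟨hK2, hcl2, hac2, hre2, ?_⟩
    intro a ha q hq haK hqK
    rcases List.mem_append.mp ha with haC | haP
    · exact hI22 a haC q hq haK hqK
    · have hap : a = p := by simpa using haP
      subst hap
      rcases List.mem_cons.mp hq with rfl | hq'
      · have hq1K : (a.1 + 1, a.2) ∈ PySem.Dict.keys d := by
          rw [← hk1, ← hk2]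
          exact hqK
        have h1 := hE1 hq1K
        exact hM2 a (a.1 + 1, a.2) (by rw [hk1]; exact hpK) (by rw [hk1]; exact hq1K) h1
      · rcases List.mem_cons.mp hq' with rfl | h
        · exact hE2 (by rw [hk2] at hqK; exact hqK)
        · simp at h
  · have hd' : ufUnionCell d p = d := by
      rw [ufUnionCell, if_neg (by simpa using hps)]
    rw [hd']
    obtain ⟨hK, hcl, hac, hre, hI2⟩ := hU
    refine ⟨hK, hcl, hac, hre, ?_⟩
    intro a ha q hq haK hqK
    rcases List.mem_append.mp ha with haC | haP
    · exact hI2 a haC q hq haK hqK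
    · have hap : a = p := by simpa using haP
      subst hap
      exact absurd (isSome_get?_of_mem_keys haK) hps

lemma uf_scan (land : List (List Int)) (n m : Int) :
    ∀ (cells C : List (Int × Int)) (d : PySem.Dict (Int × Int) (Int × Int)),
      UFI land n m C d → UFI land n m (C ++ cells) (cells.foldl ufUnionCell d) := by
  intro cells
  induction cells with
  | nil => intro C d h; simpa using h
  | cons c t ih =>
    intro C d h
    rw [List.foldl_cons]
    have h1 := unionCell_pres land n m C d c h
    have h2 := ih (C ++ [c]) (ufUnionCell d c) h1
    simpa [List.append_assoc] using h2

lemma ufInit_spec (land : List (List Int)) (n m : Int) :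
    PySem.Dict.keys (ufInit land n m) = oilList land n m ∧
    (∀ p : Int × Int, PySem.Dict.get? (ufInit land n m) p =
      if p ∈ oilList land n m then some p else none) := by
  have hgen : ∀ (l : List (Int × Int)) (d : PySem.Dict (Int × Int) (Int × Int)),
      l.Nodup → (∀ x ∈ l, x ∉ PySem.Dict.keys d) →
      PySem.Dict.keys (l.foldl (fun d p =>
          if pvCell1 land p.1 p.2 then PySem.Dict.insert d p p else d) d) =
        PySem.Dict.keys d ++ l.filter (fun p => pvCell1 land p.1 p.2) ∧
      (∀ x, PySem.Dict.get? (l.foldl (fun d p =>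
          if pvCell1 land p.1 p.2 then PySem.Dict.insert d p p else d) d) x =
        if x ∈ l ∧ pvCell1 land x.1 x.2 = true then some x else PySem.Dict.get? d x) := by
    intro l
    induction l with
    | nil =>
      intro d _ _
      refine ⟨by simp, fun x => ?_⟩
      rw [if_neg (by simp)]
      rfl
    | cons c t ih =>
      intro d hnd hfresh
      obtain ⟨hct, htnd⟩ := List.nodup_cons.mp hnd
      rw [List.foldl_cons]
      by_cases hc : pvCell1 land c.1 c.2 = true
      · rw [if_pos hc]
        have hncont : PySem.Dict.contains d c = false := by
          rw [PySem.Dict.contains_eq_isSome_get?]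
          rw [(PySem.Dict.get?_eq_none_iff_not_mem_keys d c).mpr (hfresh c List.mem_cons_self)]
          rfl
        have hkeys1 : PySem.Dict.keys (PySem.Dict.insert d c c) = PySem.Dict.keys d ++ [c] :=
          PySem.Dict.keys_insert_of_not_contains d c hncont
        obtain ⟨hk, hg⟩ := ih (PySem.Dict.insert d c c) htnd (by
          intro x hx
          rw [hkeys1, List.mem_append]
          rintro (hxd | hxc)
          · exact hfresh x (List.mem_cons_of_mem _ hx) hxd
          · have hxc' : x = c := by simpa using hxc
            exact hct (hxc' ▸ hx))
        refine ⟨by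
          rw [hk, hkeys1]
          simp [hc], fun x => ?_⟩
        rw [hg x, PySem.Dict.get?_insert]
        by_cases hxt : x ∈ t ∧ pvCell1 land x.1 x.2 = true
        · rw [if_pos hxt, if_pos ⟨List.mem_cons_of_mem _ hxt.1, hxt.2⟩]
        · rw [if_neg hxt]
          by_cases hxc : x = c
          · subst hxc
            rw [if_pos rfl, if_pos ⟨List.mem_cons_self, hc⟩]
          · rw [if_neg hxc, if_neg (by
              rintro ⟨hm, hcell⟩
              rcases List.mem_cons.mp hm with rfl | hm'
              · exact hxc rfl
              · exact hxt ⟨hm', hcell⟩)]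
      · rw [if_neg hc]
        obtain ⟨hk, hg⟩ := ih d htnd (fun x hx => hfresh x (List.mem_cons_of_mem _ hx))
        refine ⟨by
          rw [hk]
          simp [hc], fun x => ?_⟩
        rw [hg x]
        by_cases hxt : x ∈ t ∧ pvCell1 land x.1 x.2 = true
        · rw [if_pos hxt, if_pos ⟨List.mem_cons_of_mem _ hxt.1, hxt.2⟩]
        · rw [if_neg hxt, if_neg (by
            rintro ⟨hm, hcell⟩
            rcases List.mem_cons.mp hm with rfl | hm'
            · rw [hcell] at hc
              exact hc rfl
            · exact hxt ⟨hm', hcell⟩)]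
  have hinit : ufInit land n m = (pvGrid n m).foldl (fun d p =>
      if pvCell1 land p.1 p.2 then PySem.Dict.insert d p p else d) PySem.Dict.empty := by
    unfold ufInit
    exact pvScan_eq n m
      (fun d p => if pvCell1 land p.1 p.2 then PySem.Dict.insert d p p else d) PySem.Dict.empty
  obtain ⟨hk, hg⟩ := hgen (pvGrid n m) PySem.Dict.empty (pvGrid_nodup n m) (by simp)
  constructor
  · rw [hinit, hk]
    simp [oilList]
  · intro p
    rw [hinit, hg p]
    by_cases hp : p ∈ oilList land n m
    · have := List.mem_filter.mp hp
      rw [if_pos ⟨(List.mem_filter.mp hp).1, by simpa using (List.mem_filter.mp hp).2⟩,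
        if_pos hp]
    · rw [if_neg (by
        rintro ⟨hm, hc⟩
        exact hp (List.mem_filter.mpr ⟨hm, by simpa using hc⟩)), if_neg hp]
      rfl

-- ===== counting lemmas =====

lemma countP_cons_mem (r : Int × Int) (rs : List (Int × Int)) (hr : r ∉ rs) :
    ∀ l : List (Int × Int),
      l.countP (fun x => decide (x ∈ r :: rs)) = l.count r + l.countP (fun x => decide (x ∈ rs)) := by
  intro l
  induction l with
  | nil => simp
  | cons a t ih =>
    rw [List.count_cons]
    by_cases ha : a = r
    · subst ha
      rw [List.countP_cons_of_pos (l := t) (by simp), List.countP_cons_of_neg (l := t) (by simpa using hr)]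
      simp only [ih]
      simp
      omega
    · rw [List.countP_cons, List.countP_cons]
      have : (a == r) = false := by simpa using ha
      simp only [ih, this]
      by_cases hm : a ∈ rs
      · simp [hm, ha]
        omega
      · simp [hm, ha]

lemma sum_count_nodup (l : List (Int × Int)) :
    ∀ rs : List (Int × Int), rs.Nodup →
      ((rs.map (fun r => (l.count r : Int))).sum : Int) =
        (l.countP (fun x => decide (x ∈ rs)) : Int) := by
  intro rs
  induction rs with
  | nil => simp
  | cons r t ih =>
    intro hnd
    obtain ⟨hr, ht⟩ := List.nodup_cons.mp hnd
    rw [List.map_cons, List.sum_cons, ih ht, countP_cons_mem r t hr l]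
    push_cast
    ring

lemma uf_adj_root_eq (land : List (List Int)) (n m : Int)
    (d : PySem.Dict (Int × Int) (Int × Int)) (hU : UFI land n m (pvGrid n m) d)
    {a b : Int × Int} (hadj : pvAdj land n m a b) : ufRoot d a = ufRoot d b := by
  obtain ⟨hK, hcl, hac, hre, hI2⟩ := hU
  have haK : a ∈ PySem.Dict.keys d := by rw [hK]; exact mem_oilList.mpr hadj.1
  have hbK : b ∈ PySem.Dict.keys d := by rw [hK]; exact mem_oilList.mpr hadj.2.1
  have haG : a ∈ pvGrid n m := pvOil_mem_grid (x := a.1) (y := a.2) hadj.1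
  have hbG : b ∈ pvGrid n m := pvOil_mem_grid (x := b.1) (y := b.2) hadj.2.1
  have hd := hadj.2.2
  simp only [pvDirs, List.mem_cons, List.not_mem_nil, or_false, Prod.mk.injEq] at hd
  rcases hd with ⟨h1, h2⟩ | ⟨h1, h2⟩ | ⟨h1, h2⟩ | ⟨h1, h2⟩
  · have hb : b = (a.1 + 1, a.2) := Prod.ext (by omega) (by omega)
    subst hb
    exact hI2 a haG _ List.mem_cons_self haK hbK
  · have ha : a = (b.1 + 1, b.2) := Prod.ext (by omega) (by omega)
    subst ha
    exact (hI2 b hbG _ List.mem_cons_self hbK haK).symm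
  · have hb : b = (a.1, a.2 + 1) := Prod.ext (by omega) (by omega)
    subst hb
    exact hI2 a haG _ (List.mem_cons_of_mem _ List.mem_cons_self) haK hbK
  · have ha : a = (b.1, b.2 + 1) := Prod.ext (by omega) (by omega)
    subst ha
    exact (hI2 b hbG _ (List.mem_cons_of_mem _ List.mem_cons_self) hbK haK).symm

lemma uf_reach_root_eq (land : List (List Int)) (n m : Int)
    (d : PySem.Dict (Int × Int) (Int × Int)) (hU : UFI land n m (pvGrid n m) d)
    {a b : Int × Int} (h : pvReach land n m a b) : ufRoot d a = ufRoot d b := by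
  induction h with
  | refl => rfl
  | tail _ hl ih => rw [ih, uf_adj_root_eq land n m d hU hl]

lemma uf_root_reach (land : List (List Int)) (n m : Int)
    (d : PySem.Dict (Int × Int) (Int × Int)) (hU : UFI land n m (pvGrid n m) d)
    {a : Int × Int} (ha : a ∈ PySem.Dict.keys d) : pvReach land n m a (ufRoot d a) :=
  reach_of_chain hU.2.2.2.1 (ufRoot_fix d hU.2.1 hU.2.2.1 ha).2

lemma uf_root_iff (land : List (List Int)) (n m : Int)
    (d : PySem.Dict (Int × Int) (Int × Int)) (hU : UFI land n m (pvGrid n m) d)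
    {a b : Int × Int} (ha : a ∈ PySem.Dict.keys d) (hb : b ∈ PySem.Dict.keys d) :
    ufRoot d a = ufRoot d b ↔ pvReach land n m a b := by
  constructor
  · intro heq
    have h1 := uf_root_reach land n m d hU ha
    have h2 := uf_root_reach land n m d hU hb
    rw [heq] at h1
    exact Relation.ReflTransGen.trans h1 (pvReach_symm h2)
  · exact uf_reach_root_eq land n m d hU

lemma ufSizes_getD (d : PySem.Dict (Int × Int) (Int × Int)) (r : Int × Int) :
    PySem.Dict.getD (ufSizes d) r 0 =
      (((PySem.Dict.keys d).map (ufRoot d)).count r : Int) := by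
  have h1 : ufSizes d = ((PySem.Dict.keys d).map (ufRoot d)).foldl
      (fun s x => PySem.Dict.modify s x 0 (· + 1)) PySem.Dict.empty := by
    rw [ufSizes, List.foldl_map]
    rfl
  rw [h1, PySem.Dict.getD_foldl_modify_add_one, PySem.Dict.getD_empty, zero_add]

lemma ufColSum_eq (land : List (List Int)) (n m : Int)
    (d : PySem.Dict (Int × Int) (Int × Int)) (hU : UFI land n m (pvGrid n m) d) (j : Int) :
    ufColSum d (ufSizes d) n j = (touchCnt land n m (oilList land n m) j : Int) := by
  have hK := hU.1
  set rs := PySem.Set.ofList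
      (((PySem.List.pyRange 0 n 1).filter (fun i => (PySem.Dict.get? d (i, j)).isSome)).map
        (fun i => ufFind d (PySem.Dict.size d) (i, j))) with hrs
  have hcol : ufColSum d (ufSizes d) n j =
      (rs.map (fun r => PySem.Dict.getD (ufSizes d) r 0)).sum := by
    rw [ufColSum, PySem.List.foldl_add, zero_add]
  have hmem_rs : ∀ r, r ∈ rs ↔ ∃ i : Int, (i, j) ∈ PySem.Dict.keys d ∧ 0 ≤ i ∧ i < n ∧
      r = ufRoot d (i, j) := by
    intro r
    rw [hrs, PySem.Set.mem_ofList, List.mem_map]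
    constructor
    · rintro ⟨i, hi, rfl⟩
      obtain ⟨hir, his⟩ := List.mem_filter.mp hi
      rw [PySem.List.mem_pyRange_one] at hir
      refine ⟨i, ?_, hir.1, hir.2, rfl⟩
      obtain ⟨w, hw⟩ := Option.isSome_iff_exists.mp (by simpa using his)
      exact mem_keys_of_get?_some hw
    · rintro ⟨i, hiK, hi0, hi1, rfl⟩
      refine ⟨i, List.mem_filter.mpr ⟨PySem.List.mem_pyRange_one.mpr ⟨hi0, hi1⟩,
        by simpa using isSome_get?_of_mem_keys hiK⟩, rfl⟩
  have hmap : rs.map (fun r => PySem.Dict.getD (ufSizes d) r 0) =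
      rs.map (fun r => (((PySem.Dict.keys d).map (ufRoot d)).count r : Int)) :=
    List.map_congr_left (fun r _ => ufSizes_getD d r)
  rw [hcol, hmap, sum_count_nodup _ rs (PySem.Set.nodup_ofList _), List.countP_map]
  have hpoint : ∀ p ∈ PySem.Dict.keys d,
      ((fun x => decide (x ∈ rs)) ∘ ufRoot d) p =
        (fun p => @decide (pvTouch land n m p j) (Classical.propDecidable _)) p := by
    intro p hpK
    simp only [Function.comp_apply]
    have hiff : ufRoot d p ∈ rs ↔ pvTouch land n m p j := by
      rw [hmem_rs]
      constructor
      · rintro ⟨i, hiK, _, _, heq⟩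
        have hreach : pvReach land n m p (i, j) :=
          (uf_root_iff land n m d hU hpK hiK).mp heq
        exact ⟨(i, j), hreach, rfl⟩
      · rintro ⟨q, hq, hq2⟩
        have hpo : pvOil land n m p.1 p.2 = true := mem_oilList.mp (hK ▸ hpK)
        have hqo : pvOil land n m q.1 q.2 = true := pvReach_oil hpo hq
        have hqK : q ∈ PySem.Dict.keys d := by rw [hK]; exact mem_oilList.mpr hqo
        have hqe : q = (q.1, j) := Prod.ext rfl hq2
        simp only [pvOil, Bool.and_eq_true, decide_eq_true_eq] at hqo
        refine ⟨q.1, by rw [← hqe]; exact hqK, hqo.1.1.1.1, hqo.1.1.1.2, ?_⟩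
        have : ufRoot d p = ufRoot d q := uf_reach_root_eq land n m d hU hq
        rw [this, ← hqe]
    rcases Classical.em (pvTouch land n m p j) with ht | ht
    · rw [decide_eq_true (hiff.mpr ht), @decide_eq_true _ (Classical.propDecidable _) ht]
    · rw [decide_eq_false (fun hc => ht (hiff.mp hc)),
        @decide_eq_false _ (Classical.propDecidable _) ht]
  rw [List.countP_congr (fun x hx => by rw [hpoint x hx])]
  rw [touchCnt, ← List.countP_eq_length_filter, hK]

lemma main_eq (land : List (List Int)) (n m : Int) (hm : 0 ≤ m) :
    ((pvGrid n m).foldl (pvAOuter land n m) ([], List.replicate m.toNat 0)).2 =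
      (PySem.List.pyRange 0 m 1).map (fun j =>
        ufColSum ((pvGrid n m).foldl ufUnionCell (ufInit land n m))
          (ufSizes ((pvGrid n m).foldl ufUnionCell (ufInit land n m))) n j) := by
  -- A's scan, characterized
  have hInit : AInv land n m [] (([], List.replicate m.toNat 0) :
      List (Int × Int) × List Int) := by
    refine ⟨List.nodup_nil, by simp, by simp, by simp, by simp, ?_⟩
    intro j hj0 hjm
    have : PySem.List.pyGetD (List.replicate m.toNat (0 : Int)) j 0 = 0 := by
      rw [PySem.List.pyGetD_of_nonneg _ _ hj0]
      rw [List.getD_eq_getElem?_getD, List.getElem?_replicate]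
      split_ifs <;> rfl
    rw [this]
    simp [touchCnt]
  have hA := A_scan land n m (pvGrid n m) [] ([], List.replicate m.toNat 0)
    (fun p hp => hp) hInit
  rw [List.nil_append] at hA
  set stF := (pvGrid n m).foldl (pvAOuter land n m) ([], List.replicate m.toNat 0) with hstF
  obtain ⟨hndF, hoilF, hclF, hCF, hlenF, hcolsF⟩ := hA
  have hperm : stF.1.Perm (oilList land n m) := by
    refine (List.perm_ext_iff_of_nodup hndF (oilList_nodup land n m)).mpr ?_
    intro x
    constructor
    · intro hx
      exact mem_oilList.mpr (hoilF x hx)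
    · intro hx
      have hxo := mem_oilList.mp hx
      exact hCF x (pvOil_mem_grid (x := x.1) (y := x.2) hxo) hxo
  have hcolsF' : ∀ j : Int, 0 ≤ j → j < m →
      PySem.List.pyGetD stF.2 j 0 = (touchCnt land n m (oilList land n m) j : Int) := by
    intro j hj0 hjm
    rw [hcolsF j hj0 hjm, touchCnt_perm hperm]
  -- B's union-find, characterized
  have hU0 : UFI land n m [] (ufInit land n m) := by
    obtain ⟨hK0, hg0⟩ := ufInit_spec land n m
    have hgetp : ∀ p q : Int × Int, PySem.Dict.get? (ufInit land n m) p = some q → q = p := by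
      intro p q hpq
      rw [hg0 p] at hpq
      by_cases hp : p ∈ oilList land n m
      · rw [if_pos hp] at hpq
        cases hpq
        rfl
      · rw [if_neg hp] at hpq
        cases hpq
    refine ⟨hK0, ?_, ⟨fun _ => 0, ?_⟩, ?_, by simp⟩
    · intro p q hpq
      have := hgetp p q hpq
      subst this
      exact mem_keys_of_get?_some hpq
    · intro p q hpq hqp
      exact absurd (hgetp p q hpq) hqp
    · intro p q hpq
      rw [hgetp p q hpq]
      exact Relation.ReflTransGen.refl
  have hUF := uf_scan land n m (pvGrid n m) [] (ufInit land n m) hU0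
  rw [List.nil_append] at hUF
  set parF := (pvGrid n m).foldl ufUnionCell (ufInit land n m) with hparF
  -- the two cols_oil lists are equal entry by entry
  apply List.ext_getElem
  · rw [hlenF, List.length_map, PySem.List.length_pyRange_one]
    omega
  · intro k hk1 hk2
    have hkm : (k : Int) < m := by
      rw [hlenF] at hk1
      omega
    have hL : stF.2[k] = (touchCnt land n m (oilList land n m) (k : Int) : Int) := by
      have h1 : PySem.List.pyGetD stF.2 (k : Int) 0 = stF.2.getD k 0 := by
        rw [PySem.List.pyGetD_natCast]
      have h2 : stF.2.getD k 0 = stF.2[k] := List.getD_eq_getElem stF.2 0 hk1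
      rw [← h2, ← h1]
      exact hcolsF' (k : Int) (Int.natCast_nonneg k) hkm
    rw [hL, List.getElem_map, PySem.List.getElem_pyRange_one, zero_add]
    exact (ufColSum_eq land n m parF hUF (k : Int)).symm

-- ===== VERDICT =====
theorem solution_spec : Claim_equal_solution := by
  unfold Claim_equal_solution
  intro land _ _
  unfold Spec_solution solution solution_alt
  dsimp only
  rw [pvScan_eq, pvScan_eq]
  rw [main_eq land (land.length : Int) (((PySem.List.pyGetD land 0 []).length : Nat) : Int)
    (Int.natCast_nonneg _)]
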